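-- pv_equiv track=rewrite | github.com/KJShreeman/ChordTheory | piano.py | chordlist
-- ===== SOURCE A (Python) =====
-- notes = ['C','C#','D','D#','E','F','F#','G','G#','A','A#','B','C','C#','D','D#','E','F','F#','G','G#','A','A#','B'] #all sharps
--
-- majorpattern = [2,2,1,2,2,2,1]
--
-- minorpattern = [2,1,2,2,1,2,2]
--
-- sequence = ['Major','Minor','Minor','Major','Major','Minor','Diminished'] #major
--
-- sequence2 = ['Minor','Diminished','Major','Minor','Major','Major','Major'] #minor
--
-- scale = [] #Used in keynotes to write the notes of a key
--
-- def keynotes(key,isMajor):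
--     """Creates and returns a list of notes in the given key"""
--     j = notes.index(key)
--     scale2 = scale[:]
--     scale2.append(key)
--     if isMajor:
--         for k in majorpattern:
--             index = j+k
--             if index <= len(notes):
--                 note = notes[index]
--                 scale2.append(note)
--                 j = j+k
--     else:
--         for k in minorpattern:
--             index = j+k
--             if index <= len(notes):
--                 note = notes[index]
--                 scale2.append(note)
--                 j = j+k
--     return removeextra(scale2)
--
-- def removeextra(scale):
--     """Removes extra notes and returns scale"""
--     if len(scale) == 8:
--         del scale[7]
--     return scale
--
-- def scaledict(notes_summarized):
--     """Creates and returns a dictionary of 24 major and minor scales. Calls keynotes() to get notes"""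
--     dict = {}
--     for note in notes_summarized:
--         list1 = keynotes(note,True)
--         list2 = keynotes(note,False)
--         string1 = note + ' ' + 'Major'
--         string2 = note + ' ' + 'Minor'
--         dict[string1] = list1
--         dict[string2] = list2
--     return dict
--
-- def chordlist(notes_summarized):
--     """Returns a dict containing '<major/minor name>': [chords]. Calls scale_dict() to get get initial dict"""
--     dict = scaledict(notes_summarized)
--     emptydict = {} #Storing dict
--     emptylist = []
--     for key,value in dict.items():
--         if 'j' in list(key): #If major key
--             for i in range(len(value)):  # length of keynotes and sequence is same
--                 string = value[i] + " " + sequence[i]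
--                 emptylist.append(string)
--             emptydict[key] = emptylist
--             emptylist = []
--         else: #If minor key
--             for i in range(len(value)):  # length of keynotes and sequence is same
--                 string = value[i] + " " + sequence2[i]
--                 emptylist.append(string)
--             emptydict[key] = emptylist
--             emptylist = []
--     return emptydict
-- ===== SOURCE B (Python) =====
-- # Single-pass re-implementation: no intermediate scale dict, scales via cumulative
-- # semitone offsets modulo 12 zipped directly with the chord-quality sequences.
-- NOTES12 = ['C','C#','D','D#','E','F','F#','G','G#','A','A#','B']
-- MAJ_OFF = [0, 2, 4, 5, 7, 9, 11]
-- MIN_OFF = [0, 2, 3, 5, 7, 8, 10]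
-- SEQ_MAJ = ['Major','Minor','Minor','Major','Major','Minor','Diminished']
-- SEQ_MIN = ['Minor','Diminished','Major','Minor','Major','Major','Major']
--
-- def chordlist(notes_summarized):
--     out = {}
--     for note in notes_summarized:
--         j = NOTES12.index(note)
--         out[note + ' Major'] = [NOTES12[(j + o) % 12] + ' ' + q
--                                 for o, q in zip(MAJ_OFF, SEQ_MAJ)]
--         out[note + ' Minor'] = [NOTES12[(j + o) % 12] + ' ' + q
--                                 for o, q in zip(MIN_OFF, SEQ_MIN)]
--     return out
-- ===== Notes on version B (the rewrite author's own statement) =====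
-- stated objective: simpler
-- what changed: B replaces A's two-stage pipeline (build a scale dict via pattern-stepping over a doubled 24-note table with a length-8 trim, then rescan that dict re-deriving major/minor from "'j' in key") with one direct pass that computes each scale from fixed cumulative semitone offsets mod 12 zipped with the quality sequence.
import Mathlib
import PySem

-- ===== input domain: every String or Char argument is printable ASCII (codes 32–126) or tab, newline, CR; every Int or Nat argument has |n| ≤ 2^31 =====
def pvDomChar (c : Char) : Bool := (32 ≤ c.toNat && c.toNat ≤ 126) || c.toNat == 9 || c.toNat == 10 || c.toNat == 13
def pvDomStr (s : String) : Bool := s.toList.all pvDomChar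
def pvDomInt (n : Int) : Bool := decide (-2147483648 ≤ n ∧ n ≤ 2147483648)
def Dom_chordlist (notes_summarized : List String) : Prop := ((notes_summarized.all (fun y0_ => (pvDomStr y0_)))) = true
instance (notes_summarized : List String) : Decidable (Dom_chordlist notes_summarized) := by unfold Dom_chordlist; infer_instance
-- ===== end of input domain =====

-- B folds A's build-scale-dict-then-rescan pipeline into one direct pass using cumulative
-- semitone offsets mod 12 (objective: simpler decomposition, same asymptotic cost).

-- ===== PORT A =====
def notesA : List String :=
  ["C","C#","D","D#","E","F","F#","G","G#","A","A#","B",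
   "C","C#","D","D#","E","F","F#","G","G#","A","A#","B"]
def majorpattern : List Int := [2,2,1,2,2,2,1]
def minorpattern : List Int := [2,1,2,2,1,2,2]
def sequenceA : List String := ["Major","Minor","Minor","Major","Major","Minor","Diminished"]
def sequence2A : List String := ["Minor","Diminished","Major","Minor","Major","Major","Major"]

-- the loop body shared verbatim by A's two isMajor branches (they differ only in the pattern)
def keynotesLoop (pat : List Int) (st : Int × List String) : Int × List String :=
  pat.foldl (fun st k =>
    let index := st.1 + k
    if index ≤ (notesA.length : Int) then
      match PySem.List.pyGet? notesA index with
      | some note => (st.1 + k, st.2 ++ [note])   -- notes[index]; append; j = j+k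
      | none => st    -- Python would raise IndexError here; unreachable for keys found in notesA
    else st) st

def removeextraA (scale : List String) : List String :=
  if scale.length = 8 then scale.eraseIdx 7 else scale   -- del scale[7]

def keynotesA (key : String) (isMajor : Bool) : List String :=
  match PySem.List.index? notesA key with
  | none => []    -- Python raises ValueError here; such inputs are excluded by Pre_
  | some j =>
    let scale2 : List String := [] ++ [key]   -- scale[:] with scale = []; scale2.append(key)
    let st := if isMajor then keynotesLoop majorpattern ((j : Int), scale2)
              else keynotesLoop minorpattern ((j : Int), scale2)
    removeextraA st.2

def scaledictA (notes_summarized : List String) : PySem.Dict String (List String) :=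
  notes_summarized.foldl (fun d note =>
    let list1 := keynotesA note true
    let list2 := keynotesA note false
    let string1 := note ++ " " ++ "Major"
    let string2 := note ++ " " ++ "Minor"
    (d.insert string1 list1).insert string2 list2) PySem.Dict.empty

-- the inner 'for i in range(len(value))' loop, shared verbatim by both branches (they differ only in seq)
def chordRow (value : List String) (seq : List String) : List String :=
  (PySem.List.pyRange 0 (value.length : Int) 1).foldl
    (fun acc i => acc ++ [PySem.List.pyGetD value i "" ++ " " ++ PySem.List.pyGetD seq i ""]) []

def chordlist (notes_summarized : List String) : List (String × List String) :=
  let d := scaledictA notes_summarized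
  let emptydict := d.items.foldl (fun (ed : PySem.Dict String (List String)) kv =>
    if 'j' ∈ kv.1.toList then ed.insert kv.1 (chordRow kv.2 sequenceA)
    else ed.insert kv.1 (chordRow kv.2 sequence2A)) PySem.Dict.empty
  emptydict.items

-- ===== PORT B =====
def NOTES12 : List String := ["C","C#","D","D#","E","F","F#","G","G#","A","A#","B"]
def MAJ_OFF : List Int := [0, 2, 4, 5, 7, 9, 11]
def MIN_OFF : List Int := [0, 2, 3, 5, 7, 8, 10]
def SEQ_MAJ : List String := ["Major","Minor","Minor","Major","Major","Minor","Diminished"]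
def SEQ_MIN : List String := ["Minor","Diminished","Major","Minor","Major","Major","Major"]

-- [NOTES12[(j+o) % 12] + ' ' + q for o, q in zip(offs, seq)]  ((j+o)%12 is always in range)
def bRow (j : Int) (offs : List Int) (seq : List String) : List String :=
  (offs.zip seq).map (fun oq =>
    PySem.List.pyGetD NOTES12 (PySem.Int.mod (j + oq.1) 12) "" ++ " " ++ oq.2)

def chordlist_alt (notes_summarized : List String) : List (String × List String) :=
  (notes_summarized.foldl (fun (out : PySem.Dict String (List String)) note =>
    match PySem.List.index? NOTES12 note with
    | none => out   -- Python raises ValueError here; such inputs are excluded by Pre_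
    | some j =>
      (out.insert (note ++ " Major") (bRow (j : Int) MAJ_OFF SEQ_MAJ)).insert
        (note ++ " Minor") (bRow (j : Int) MIN_OFF SEQ_MIN)) PySem.Dict.empty).items

-- ===== PRECONDITION & SPEC =====
-- Pre_ excludes exactly the inputs on which A raises ValueError (notes.index on a string
-- that is not one of the twelve note names).
def Pre_chordlist (notes_summarized : List String) : Prop :=
  ∀ s ∈ notes_summarized, s ∈ NOTES12
instance (notes_summarized : List String) : Decidable (Pre_chordlist notes_summarized) := by
  unfold Pre_chordlist; infer_instance

def pvWitness_chordlist : List String := ["C", "A#", "C"]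

def Spec_chordlist (notes_summarized : List String) (out : List (String × List String)) : Prop := out = chordlist_alt notes_summarized
instance (notes_summarized : List String) (out : List (String × List String)) : Decidable (Spec_chordlist notes_summarized out) := by unfold Spec_chordlist; infer_instance

-- ===== CLAIM (what is proved, stated in full; the proofs are below) =====
def Claim_equal_chordlist : Prop := ∀ (notes_summarized : List String), Dom_chordlist notes_summarized → Pre_chordlist notes_summarized → Spec_chordlist notes_summarized (chordlist notes_summarized)

-- ===== LEMMAS AND PROOFS =====

-- the per-item transformation A's second stage applies to a scaledict entry
def gA (kv : String × List String) : String × List String :=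
  (kv.1, if 'j' ∈ kv.1.toList then chordRow kv.2 sequenceA else chordRow kv.2 sequence2A)

lemma gA_fst (kv : String × List String) : (gA kv).1 = kv.1 := rfl

-- per-note computation: for each of the 12 note names, A's two transformed entries are
-- exactly B's two entries (12 closed cases, each checked by decide)
lemma note_facts (s : String) (hs : s ∈ NOTES12) :
    ∃ j : Nat, PySem.List.index? NOTES12 s = some j ∧
      gA (s ++ " " ++ "Major", keynotesA s true) = (s ++ " Major", bRow (j : Int) MAJ_OFF SEQ_MAJ) ∧
      gA (s ++ " " ++ "Minor", keynotesA s false) = (s ++ " Minor", bRow (j : Int) MIN_OFF SEQ_MIN) := by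
  simp only [NOTES12, List.mem_cons, List.not_mem_nil, or_false] at hs
  rcases hs with h|h|h|h|h|h|h|h|h|h|h|h <;> subst h
  · exact ⟨0, by decide⟩
  · exact ⟨1, by decide⟩
  · exact ⟨2, by decide⟩
  · exact ⟨3, by decide⟩
  · exact ⟨4, by decide⟩
  · exact ⟨5, by decide⟩
  · exact ⟨6, by decide⟩
  · exact ⟨7, by decide⟩
  · exact ⟨8, by decide⟩
  · exact ⟨9, by decide⟩
  · exact ⟨10, by decide⟩
  · exact ⟨11, by decide⟩

lemma keys_map_gA (l : List (String × List String)) :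
    (l.map gA).map Prod.fst = l.map Prod.fst := by
  simp [List.map_map, Function.comp_def, gA_fst]

-- mapping gA over the items commutes with an insert whose value gA sends v to w
lemma items_insert_map (d d' : PySem.Dict String (List String))
    (h : d'.items = d.items.map gA) (k : String) (v w : List String)
    (hg : gA (k, v) = (k, w)) :
    (d'.insert k w).items = ((d.insert k v).items).map gA := by
  have hkeys : d'.keys = d.keys := by
    simp only [PySem.Dict.keys, h, keys_map_gA]
  have hcont : d'.contains k = d.contains k := by
    rw [PySem.Dict.contains_eq_decide_mem_keys, PySem.Dict.contains_eq_decide_mem_keys, hkeys]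
  by_cases hc : d.contains k = true
  · rw [PySem.Dict.items_insert_of_contains _ _ (hcont ▸ hc),
        PySem.Dict.items_insert_of_contains _ _ hc, h, List.map_map, List.map_map]
    refine List.map_congr_left (fun p _ => ?_)
    by_cases hp : p.1 = k
    · simp [gA_fst, hp, hg]
    · simp [gA_fst, hp]
  · have hc' : d.contains k = false := by revert hc; cases d.contains k <;> simp
    rw [PySem.Dict.items_insert_of_not_contains _ _ (hcont ▸ hc'),
        PySem.Dict.items_insert_of_not_contains _ _ hc', h, List.map_append]
    simp [hg]

-- B's single pass equals A's first pass with gA mapped over its items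
lemma fold_invariant (ns : List String) (hpre : ∀ s ∈ ns, s ∈ NOTES12) :
    ∀ (d d' : PySem.Dict String (List String)), d'.items = d.items.map gA →
      (ns.foldl (fun (out : PySem.Dict String (List String)) note =>
        match PySem.List.index? NOTES12 note with
        | none => out
        | some j =>
          (out.insert (note ++ " Major") (bRow (j : Int) MAJ_OFF SEQ_MAJ)).insert
            (note ++ " Minor") (bRow (j : Int) MIN_OFF SEQ_MIN)) d').items
      = ((ns.foldl (fun d note =>
          let list1 := keynotesA note true
          let list2 := keynotesA note false
          let string1 := note ++ " " ++ "Major"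
          let string2 := note ++ " " ++ "Minor"
          (d.insert string1 list1).insert string2 list2) d).items).map gA := by
  induction ns with
  | nil => intro d d' h; simpa using h
  | cons s ns ih =>
    intro d d' h
    have hs : s ∈ NOTES12 := hpre s (List.mem_cons_self ..)
    obtain ⟨j, hj, hmaj, hmin⟩ := note_facts s hs
    have hkM : s ++ " Major" = s ++ " " ++ "Major" := by
      have := congrArg Prod.fst hmaj; simpa [gA_fst] using this.symm
    have hkm : s ++ " Minor" = s ++ " " ++ "Minor" := by
      have := congrArg Prod.fst hmin; simpa [gA_fst] using this.symm
    rw [hkM] at hmaj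
    rw [hkm] at hmin
    simp only [List.foldl_cons, hj, hkM, hkm]
    refine ih (fun t ht => hpre t (List.mem_cons_of_mem _ ht)) _ _ ?_
    exact items_insert_map _ _ (items_insert_map d d' h _ _ _ hmaj) _ _ _ hmin

-- keys of scaledict's fold stay Nodup
lemma nodup_scaledict_fold (ns : List String) :
    ∀ (d : PySem.Dict String (List String)), d.keys.Nodup →
      (ns.foldl (fun d note =>
        let list1 := keynotesA note true
        let list2 := keynotesA note false
        let string1 := note ++ " " ++ "Major"
        let string2 := note ++ " " ++ "Minor"
        (d.insert string1 list1).insert string2 list2) d).keys.Nodup := by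
  induction ns with
  | nil => intro d h; simpa using h
  | cons s ns ih =>
    intro d h
    exact ih _ (PySem.Dict.nodup_keys_insert _ _ _ (PySem.Dict.nodup_keys_insert _ _ _ h))

-- A's second stage inserts the items' keys, which are fresh and distinct: it is a map
lemma second_stage_eq_map (d : PySem.Dict String (List String)) (hnd : d.keys.Nodup) :
    (d.items.foldl (fun (ed : PySem.Dict String (List String)) kv =>
      if 'j' ∈ kv.1.toList then ed.insert kv.1 (chordRow kv.2 sequenceA)
      else ed.insert kv.1 (chordRow kv.2 sequence2A)) PySem.Dict.empty).items
    = d.items.map gA := by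
  have hfun : (fun (ed : PySem.Dict String (List String)) kv =>
      if 'j' ∈ kv.1.toList then ed.insert kv.1 (chordRow kv.2 sequenceA)
      else ed.insert kv.1 (chordRow kv.2 sequence2A))
      = (fun (ed : PySem.Dict String (List String)) kv => ed.insert kv.1 (gA kv).2) := by
    funext ed kv; unfold gA; split <;> simp_all
  rw [hfun,
    PySem.Dict.items_foldl_insert_fresh d.items Prod.fst (fun kv => (gA kv).2) PySem.Dict.empty
      (fun a _ => PySem.Dict.contains_empty _) hnd]
  have he : (PySem.Dict.empty : PySem.Dict String (List String)).items = [] := rfl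
  rw [he, List.nil_append]
  exact List.map_congr_left (fun p _ => by cases p; rfl)

-- ===== VERDICT (by name: the statement is the Claim_ definition above) =====
theorem chordlist_spec : Claim_equal_chordlist := by
  intro ns _ hpre
  unfold Spec_chordlist chordlist chordlist_alt
  rw [second_stage_eq_map (scaledictA ns)
        (nodup_scaledict_fold ns PySem.Dict.empty PySem.Dict.nodup_keys_empty),
      scaledictA]
  exact (fold_invariant ns hpre PySem.Dict.empty PySem.Dict.empty rfl).symm
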